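-- pv_equiv track=rewrite | github.com/inambioinfo/varcode | varcode/reference_name.py | infer_reference_name
-- ===== SOURCE A (Python) =====
-- reference_alias_dict = {
--     # human assemblies
--     "NCBI36": ["hg18", "B36", "NCBI36"],
--     "GRCh37": ["hg19", "B37", "NCBI37"],
--     "GRCh38": ["hg38", "B38", "NCBI38"],
--     # mouse assemblies
--     "GRCm37": ["mm9"],
--     "GRCm38": [
--         "mm10",
--         "GCF_000001635.24",  # GRCm38.p4
--         "GCF_000001635.23",  # GRCm38.p3
--         "GCF_000001635.22",  # GRCm38.p2
--         "GCF_000001635.21",  # GRCm38.p1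
--         "GCF_000001635.20",  # GRCm38
--     ],
-- }
--
-- def infer_reference_name(reference_name_or_path):
--     """
--     Given a string containing a reference name (such as a path to
--     that reference's FASTA file), return its canonical name
--     as used by Ensembl.
--     """
--     # consider reference names in reverse alphabetical order so that
--     # e.g. GRCh38 comes before GRCh37
--     for assembly_name in sorted(reference_alias_dict.keys(), reverse=True):
--         candidate_list = [assembly_name] + reference_alias_dict[assembly_name]
--         for candidate in candidate_list:
--             if candidate.lower() in reference_name_or_path.lower():
--                 return assembly_name
--     raise ValueError(
--         "Failed to infer genome assembly name for %s" % reference_name_or_path)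
-- ===== SOURCE B (Python) =====
-- reference_alias_dict = {
--     # human assemblies
--     "NCBI36": ["hg18", "B36", "NCBI36"],
--     "GRCh37": ["hg19", "B37", "NCBI37"],
--     "GRCh38": ["hg38", "B38", "NCBI38"],
--     # mouse assemblies
--     "GRCm37": ["mm9"],
--     "GRCm38": [
--         "mm10",
--         "GCF_000001635.24",
--         "GCF_000001635.23",
--         "GCF_000001635.22",
--         "GCF_000001635.21",
--         "GCF_000001635.20",
--     ],
-- }
--
--
-- def infer_reference_name(reference_name_or_path):
--     """Filter-then-max: collect every assembly whose name or alias occurs in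
--     the input (case-insensitively) and return the reverse-alphabetically
--     first one, i.e. max()."""
--     haystack = reference_name_or_path.lower()
--     matches = [
--         assembly_name
--         for assembly_name, aliases in reference_alias_dict.items()
--         if any(c.lower() in haystack for c in [assembly_name] + aliases)
--     ]
--     if not matches:
--         raise ValueError(
--             "Failed to infer genome assembly name for %s" % reference_name_or_path)
--     return max(matches)
-- ===== Notes on version B (the rewrite author's own statement) =====
-- stated objective: alternative
-- what changed: Replaces A's ordered short-circuit scan over reverse-sorted assembly names by a filter of all assemblies with a case-insensitive name/alias substring match followed by max(), which picks the same reverse-alphabetically-first assembly.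
import Mathlib
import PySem

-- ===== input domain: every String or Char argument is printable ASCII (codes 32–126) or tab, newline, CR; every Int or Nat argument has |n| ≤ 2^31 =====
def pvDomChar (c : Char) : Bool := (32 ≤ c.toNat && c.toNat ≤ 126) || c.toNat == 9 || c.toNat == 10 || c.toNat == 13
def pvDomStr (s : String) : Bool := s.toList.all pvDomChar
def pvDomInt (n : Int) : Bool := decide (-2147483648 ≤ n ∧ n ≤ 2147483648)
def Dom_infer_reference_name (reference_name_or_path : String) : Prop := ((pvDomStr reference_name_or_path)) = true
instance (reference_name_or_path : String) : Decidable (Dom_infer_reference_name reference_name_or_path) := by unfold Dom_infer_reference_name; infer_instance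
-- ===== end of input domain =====

-- B replaces A's ordered short-circuit scan over reverse-sorted keys by a filter of all
-- matching assemblies followed by max() (objective: alternative decomposition, same cost).

-- ===== PORT A =====
def reference_alias_dict : PySem.Dict String (List String) :=
  PySem.Dict.ofList [
    ("NCBI36", ["hg18", "B36", "NCBI36"]),
    ("GRCh37", ["hg19", "B37", "NCBI37"]),
    ("GRCh38", ["hg38", "B38", "NCBI38"]),
    ("GRCm37", ["mm9"]),
    ("GRCm38", ["mm10", "GCF_000001635.24", "GCF_000001635.23",
                "GCF_000001635.22", "GCF_000001635.21", "GCF_000001635.20"])]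

-- inner 'for candidate in candidate_list: if …: return assembly_name'
def pvInnerLoopA (s : String) (assembly_name : String) : List String → Option String
  | [] => none
  | c :: cs =>
      if PySem.Str.isIn (PySem.Str.lower c) (PySem.Str.lower s) then some assembly_name
      else pvInnerLoopA s assembly_name cs

-- outer 'for assembly_name in sorted(reference_alias_dict.keys(), reverse=True)'
def pvOuterLoopA (s : String) : List String → Option String
  | [] => none
  | name :: rest =>
      match pvInnerLoopA s name (name :: reference_alias_dict.getD name []) with
      | some r => some r
      | none => pvOuterLoopA s rest

def infer_reference_name (reference_name_or_path : String) : String :=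
  -- the final 'raise ValueError' is outside Pre_; "" stands for the raise
  (pvOuterLoopA reference_name_or_path
      (PySem.List.sorted (reference_alias_dict.keys) (fun k => k) true)).getD ""

-- ===== PORT B =====
def infer_reference_name_alt (reference_name_or_path : String) : String :=
  let haystack := PySem.Str.lower reference_name_or_path
  let matchNames :=
    (reference_alias_dict.items.filter
        (fun kv => (kv.1 :: kv.2).any
            (fun c => PySem.Str.isIn (PySem.Str.lower c) haystack))).map (fun kv => kv.1)
  -- 'if not matches: raise ValueError' is outside Pre_; "" stands for the raise
  (PySem.List.max? matchNames (fun y => y)).getD ""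

-- ===== PRECONDITION & SPEC =====
def pvMatch (s : String) (cands : List String) : Bool :=
  cands.any (fun c => PySem.Str.isIn (PySem.Str.lower c) (PySem.Str.lower s))

-- Pre_ excludes exactly the inputs where no assembly name or alias occurs in the
-- string (case-insensitively): there Python A raises ValueError (and B raises too).
def Pre_infer_reference_name (reference_name_or_path : String) : Prop :=
  pvMatch reference_name_or_path ["NCBI36", "hg18", "B36", "NCBI36"] = true ∨
  pvMatch reference_name_or_path ["GRCh37", "hg19", "B37", "NCBI37"] = true ∨
  pvMatch reference_name_or_path ["GRCh38", "hg38", "B38", "NCBI38"] = true ∨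
  pvMatch reference_name_or_path ["GRCm37", "mm9"] = true ∨
  pvMatch reference_name_or_path ["GRCm38", "mm10", "GCF_000001635.24", "GCF_000001635.23",
      "GCF_000001635.22", "GCF_000001635.21", "GCF_000001635.20"] = true

instance (reference_name_or_path : String) : Decidable (Pre_infer_reference_name reference_name_or_path) := by
  unfold Pre_infer_reference_name; infer_instance

def pvWitness_infer_reference_name : String := "/data/hg19.fa"

def Spec_infer_reference_name (reference_name_or_path : String) (out : String) : Prop :=
  out = infer_reference_name_alt reference_name_or_path
instance (reference_name_or_path : String) (out : String) : Decidable (Spec_infer_reference_name reference_name_or_path out) := by unfold Spec_infer_reference_name; infer_instance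

-- ===== CLAIM (what is proved, stated in full; the proofs are below) =====
def Claim_equal_infer_reference_name : Prop := ∀ (reference_name_or_path : String), Dom_infer_reference_name reference_name_or_path → Pre_infer_reference_name reference_name_or_path → Spec_infer_reference_name reference_name_or_path (infer_reference_name reference_name_or_path)

-- ===== LEMMAS AND PROOFS =====
lemma pvInnerLoopA_eq (s a : String) (cs : List String) :
    pvInnerLoopA s a cs = if pvMatch s cs then some a else none := by
  induction cs with
  | nil => rfl
  | cons c cs ih =>
      rw [pvInnerLoopA, ih]
      by_cases h : PySem.Chars.isIn (PySem.Chars.lower c.toList) (PySem.Chars.lower s.toList) = true <;>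
        simp [pvMatch, h]

lemma sorted_keys_eq :
    PySem.List.sorted (reference_alias_dict.keys) (fun k => k) true
      = ["NCBI36", "GRCm38", "GRCm37", "GRCh38", "GRCh37"] := by
  apply PySem.List.sorted_rev_eq_of_perm_of_pairwise_gt
  · decide
  · constructor
    · intro b hb
      fin_cases hb <;> (rw [String.lt_iff_toList_lt]; decide)
    · constructor
      · intro b hb
        fin_cases hb <;> (rw [String.lt_iff_toList_lt]; decide)
      · constructor
        · intro b hb
          fin_cases hb <;> (rw [String.lt_iff_toList_lt]; decide)
        · constructor
          · intro b hb
            fin_cases hb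
            rw [String.lt_iff_toList_lt]; decide
          · simp

lemma alt_eq (s : String) :
    infer_reference_name_alt s =
      (PySem.List.max?
        ((reference_alias_dict.items.filter (fun kv => pvMatch s (kv.1 :: kv.2))).map
          (fun kv => kv.1)) (fun y => y)).getD "" := rfl

-- ===== VERDICT (by name: the statement is the Claim_ definition above) =====
theorem infer_reference_name_spec : Claim_equal_infer_reference_name := by
  intro s _ hpre
  unfold Pre_infer_reference_name at hpre
  unfold Spec_infer_reference_name infer_reference_name
  rw [sorted_keys_eq, alt_eq]
  have e1 : reference_alias_dict.getD "NCBI36" [] = ["hg18", "B36", "NCBI36"] := by decide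
  have e2 : reference_alias_dict.getD "GRCh37" [] = ["hg19", "B37", "NCBI37"] := by decide
  have e3 : reference_alias_dict.getD "GRCh38" [] = ["hg38", "B38", "NCBI38"] := by decide
  have e4 : reference_alias_dict.getD "GRCm37" [] = ["mm9"] := by decide
  have e5 : reference_alias_dict.getD "GRCm38" []
      = ["mm10", "GCF_000001635.24", "GCF_000001635.23",
         "GCF_000001635.22", "GCF_000001635.21", "GCF_000001635.20"] := by decide
  have eit : reference_alias_dict.items =
      [("NCBI36", ["hg18", "B36", "NCBI36"]),
       ("GRCh37", ["hg19", "B37", "NCBI37"]),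
       ("GRCh38", ["hg38", "B38", "NCBI38"]),
       ("GRCm37", ["mm9"]),
       ("GRCm38", ["mm10", "GCF_000001635.24", "GCF_000001635.23",
                   "GCF_000001635.22", "GCF_000001635.21", "GCF_000001635.20"])] := by decide
  simp only [pvOuterLoopA, pvInnerLoopA_eq, e1, e2, e3, e4, e5, eit, List.filter_cons,
    List.filter_nil]
  cases h1 : pvMatch s ["NCBI36", "hg18", "B36", "NCBI36"] <;>
  cases h2 : pvMatch s ["GRCh37", "hg19", "B37", "NCBI37"] <;>
  cases h3 : pvMatch s ["GRCh38", "hg38", "B38", "NCBI38"] <;>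
  cases h4 : pvMatch s ["GRCm37", "mm9"] <;>
  cases h5 : pvMatch s ["GRCm38", "mm10", "GCF_000001635.24", "GCF_000001635.23",
      "GCF_000001635.22", "GCF_000001635.21", "GCF_000001635.20"] <;>
    norm_num [h1, h2, h3, h4, h5, PySem.List.max?_id_cons, max_def, String.le_iff_toList_le] <;> decide
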